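-- pv_equiv track=rewrite | github.com/igorshmukler/kokoro-ruslan | russian_phoneme_processor.py | apply_vowel_reduction
-- ===== SOURCE A (Python) =====
-- from typing import Dict, List, Optional, Set, Tuple, Union
--
-- def apply_vowel_reduction(phonemes: List[str], stress_syllable_idx: int) -> List[str]:
--     """
--     Apply vowel reduction to phoneme list based on stress position.
--     The stress_syllable_idx is the 0-based index of the *stressed syllable*.
--     """
--     if not phonemes:
--         return phonemes
--
--     reduced_phonemes = phonemes.copy()
--     current_vowel_syllable_count = 0 # This counts actual syllables based on vowel phonemes
--
--     # Create a list to store original vowel sounds for accurate reduction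
--     # This is crucial because a phoneme might be 'je' and we need 'e' for reduction logic
--     original_vowel_sounds = []
--     for ph in phonemes:
--         if ph in ['a', 'o', 'u', 'ɨ', 'e', 'i']:
--             original_vowel_sounds.append(ph)
--         elif ph in ['ja', 'jo', 'ju', 'je']:
--             original_vowel_sounds.append(ph[1:]) # Get 'a', 'o', 'u', 'e'
--         else:
--             original_vowel_sounds.append(None) # Not a vowel phoneme, placeholder
--
--     original_vowel_idx = 0 # Tracks the index in original_vowel_sounds
--
--     for i, phoneme in enumerate(reduced_phonemes):
--         is_vowel_phoneme = (original_vowel_sounds[original_vowel_idx] is not None) if original_vowel_idx < len(original_vowel_sounds) else False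
--
--         if is_vowel_phoneme:
--             base_vowel_sound = original_vowel_sounds[original_vowel_idx]
--
--             if current_vowel_syllable_count != stress_syllable_idx:  # Not the stressed syllable
--                 # Vowels before stress (pre-tonic)
--                 if current_vowel_syllable_count < stress_syllable_idx:
--                     # First pre-tonic syllable: (stressed_idx - current_idx) == 1
--                     if (stress_syllable_idx - current_vowel_syllable_count) == 1:
--                         if base_vowel_sound in ['o', 'a']:
--                             reduced_phonemes[i] = 'ɐ' # 'о', 'а' -> 'ɐ' in first pre-tonic
--                         elif base_vowel_sound in ['e', 'je', 'jo', 'i']: # 'е', 'и', 'ё' -> 'ɪ' in first pre-tonic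
--                             reduced_phonemes[i] = 'ɪ'
--                     # Second pre-tonic and beyond
--                     else:
--                         if base_vowel_sound in ['o', 'a', 'e', 'ja', 'jo', 'je', 'i']:
--                             reduced_phonemes[i] = 'ə' # Stronger reduction to schwa 'ə'
--                 # Vowels after stress (post-tonic)
--                 else:
--                     if base_vowel_sound in ['o', 'a', 'e', 'ja', 'jo', 'je', 'i']:
--                         reduced_phonemes[i] = 'ə' # Post-tonic vowels generally reduce to schwa 'ə'
--
--                 # 'u', 'ju', 'ɨ' typically do not reduce significantly in Russian (remain 'u', 'ju', 'ɨ')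
--                 # 'i' after hard consonants (which becomes 'ɨ') also does not reduce further.
--
--             current_vowel_syllable_count += 1
--             original_vowel_idx += 1 # Only increment if it was a vowel phoneme
--         else:
--             # If it's a consonant, just move past it in the phoneme list
--             if original_vowel_sounds[original_vowel_idx] is None:
--                 original_vowel_idx += 1
--
--
--     return reduced_phonemes
-- ===== SOURCE B (Python) =====
-- # Different decomposition: instead of scanning with a running syllable counter and
-- # mutating a copy in place, B first SPLITS the phoneme list into syllable chunks
-- # (each chunk = the consonants before a vowel plus that vowel, with its base vowel)
-- # and a consonant tail, then maps each chunk by its syllable number relative to the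
-- # stress and flattens the chunks back into one list.
--
-- _PLAIN = ('a', 'o', 'u', '\u0268', 'e', 'i')      # 'ɨ'
-- _IOTATED = ('ja', 'jo', 'ju', 'je')
--
--
-- def _base(ph):
--     if ph in _PLAIN:
--         return ph
--     if ph in _IOTATED:
--         return ph[1:]
--     return None
--
--
-- def _reduce(base, ph, k, stress):
--     if k == stress:
--         return ph
--     if stress - k == 1:                       # first pre-tonic syllable
--         if base in ('a', 'o'):
--             return '\u0250'                   # 'ɐ'
--         if base in ('e', 'i'):
--             return '\u026a'                   # 'ɪ'
--         return ph
--     if base in ('a', 'o', 'e', 'i'):          # other unstressed syllables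
--         return '\u0259'                       # 'ə'
--     return ph
--
--
-- def apply_vowel_reduction(phonemes, stress_syllable_idx):
--     if not phonemes:
--         return phonemes
--     chunks = []          # (consonants before the vowel, vowel phoneme, base vowel)
--     cur = []
--     for ph in phonemes:
--         b = _base(ph)
--         if b is None:
--             cur.append(ph)
--         else:
--             chunks.append((cur, ph, b))
--             cur = []
--     tail = cur           # consonants after the last vowel
--     out = []
--     for k, (cons, ph, b) in enumerate(chunks):
--         out.extend(cons)
--         out.append(_reduce(b, ph, k, stress_syllable_idx))
--     out.extend(tail)
--     return out
-- ===== Notes on version B (the rewrite author's own statement) =====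
-- stated objective: alternative
-- what changed: A scans once with a parallel original_vowel_sounds table, a syllable counter and an index, mutating a copy in place; B instead splits the phoneme list into syllable chunks (consonant run + vowel with its base) plus a consonant tail, then maps each chunk by its syllable number relative to the stress and flattens the chunks back into the output list.
import Mathlib
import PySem

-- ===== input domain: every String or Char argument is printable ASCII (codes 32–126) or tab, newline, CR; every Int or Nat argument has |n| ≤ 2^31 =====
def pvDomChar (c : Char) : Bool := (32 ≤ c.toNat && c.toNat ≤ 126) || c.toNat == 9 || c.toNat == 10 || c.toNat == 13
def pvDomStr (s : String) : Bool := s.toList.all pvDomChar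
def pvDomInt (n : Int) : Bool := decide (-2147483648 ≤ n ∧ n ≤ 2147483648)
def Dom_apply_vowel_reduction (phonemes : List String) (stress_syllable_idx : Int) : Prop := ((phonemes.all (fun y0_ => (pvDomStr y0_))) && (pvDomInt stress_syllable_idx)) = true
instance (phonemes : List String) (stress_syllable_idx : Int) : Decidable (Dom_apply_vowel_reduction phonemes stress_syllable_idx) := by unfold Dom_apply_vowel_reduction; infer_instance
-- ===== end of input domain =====

-- B replaces A's in-place scan (parallel base-vowel table + counter/index rewrite loop) by a
-- split-into-syllable-chunks / map-each-chunk / flatten decomposition (objective: alternative).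

-- ===== PORT A =====
-- A's first loop: the entry of original_vowel_sounds for one phoneme.
def pvSoundA (ph : String) : Option String :=
  if ph ∈ ["a", "o", "u", "ɨ", "e", "i"] then some ph
  else if ph ∈ ["ja", "jo", "ju", "je"] then some (PySem.Str.slice ph (some 1) none)  -- ph[1:]
  else none

-- A's main loop over enumerate(reduced_phonemes). Python fetches element i before any write to
-- index i in the same iteration and never writes ahead, so the fetched elements are the original
-- phonemes: we enumerate the original list. State: reduced list, counter c, original_vowel_idx j.
-- original_vowel_sounds[original_vowel_idx] in the consonant branch is in range in every reachable
-- state (j = i < len); getD totalizes that access. i from enumerate is ≥ 0, so i.toNat is exact.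
def avrLoopA (sounds : List (Option String)) (stress : Int) :
    List (Int × String) → List String → Int → Nat → List String
  | [], reduced, _, _ => reduced
  | (i, _phoneme) :: rest, reduced, c, j =>
    let is_vowel : Bool := if j < sounds.length then (sounds.getD j none).isSome else false
    if is_vowel then
      let base := sounds.getD j none
      let reduced' :=
        if c ≠ stress then
          if c < stress then
            if stress - c = 1 then
              if base = some "o" ∨ base = some "a" then reduced.set i.toNat "ɐ"
              else if base = some "e" ∨ base = some "je" ∨ base = some "jo" ∨ base = some "i" then
                reduced.set i.toNat "ɪ"
              else reduced
            else
              if base = some "o" ∨ base = some "a" ∨ base = some "e" ∨ base = some "ja" ∨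
                 base = some "jo" ∨ base = some "je" ∨ base = some "i" then reduced.set i.toNat "ə"
              else reduced
          else
            if base = some "o" ∨ base = some "a" ∨ base = some "e" ∨ base = some "ja" ∨
               base = some "jo" ∨ base = some "je" ∨ base = some "i" then reduced.set i.toNat "ə"
            else reduced
        else reduced
      avrLoopA sounds stress rest reduced' (c + 1) (j + 1)
    else
      let j' := if sounds.getD j none = none then j + 1 else j
      avrLoopA sounds stress rest reduced c j'

def apply_vowel_reduction (phonemes : List String) (stress_syllable_idx : Int) : List String :=
  if phonemes = [] then phonemes
  else
    let sounds := phonemes.map pvSoundA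
    avrLoopA sounds stress_syllable_idx (PySem.List.enumerate phonemes 0) phonemes 0 0

-- ===== PORT B =====
-- Source B's _base helper.
def pvBaseB (ph : String) : Option String :=
  if ph ∈ ["a", "o", "u", "ɨ", "e", "i"] then some ph
  else if ph ∈ ["ja", "jo", "ju", "je"] then some (PySem.Str.slice ph (some 1) none)
  else none

-- Source B's _reduce helper.
def pvReduceB (base ph : String) (k stress : Int) : String :=
  if k = stress then ph
  else if stress - k = 1 then
    if base = "a" ∨ base = "o" then "ɐ"
    else if base = "e" ∨ base = "i" then "ɪ"
    else ph
  else if base = "a" ∨ base = "o" ∨ base = "e" ∨ base = "i" then "ə"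
  else ph

-- Source B's first loop: split into syllable chunks (consonant run, vowel, base) and consonant tail.
def pvChunksB : List String → List String → List (List String × String × String) × List String
  | [], cur => ([], cur)
  | ph :: rest, cur =>
    match pvBaseB ph with
    | none => pvChunksB rest (cur ++ [ph])
    | some b =>
      let r := pvChunksB rest []
      ((cur, ph, b) :: r.1, r.2)

-- Source B's second loop: emit chunk k = its consonants plus the reduced vowel.
def pvEmitB (stress : Int) : List (List String × String × String) → Int → List String
  | [], _ => []
  | (cons, ph, b) :: rest, k => cons ++ pvReduceB b ph k stress :: pvEmitB stress rest (k + 1)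

def apply_vowel_reduction_alt (phonemes : List String) (stress_syllable_idx : Int) : List String :=
  if phonemes = [] then phonemes
  else
    let r := pvChunksB phonemes []
    pvEmitB stress_syllable_idx r.1 0 ++ r.2

-- ===== PRECONDITION & SPEC =====
def Spec_apply_vowel_reduction (phonemes : List String) (stress_syllable_idx : Int) (out : List String) : Prop := out = apply_vowel_reduction_alt phonemes stress_syllable_idx
instance (phonemes : List String) (stress_syllable_idx : Int) (out : List String) : Decidable (Spec_apply_vowel_reduction phonemes stress_syllable_idx out) := by unfold Spec_apply_vowel_reduction; infer_instance

-- ===== CLAIM (what is proved, stated in full; the proofs are below) =====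
def Claim_equal_apply_vowel_reduction : Prop := ∀ (phonemes : List String) (stress_syllable_idx : Int), Dom_apply_vowel_reduction phonemes stress_syllable_idx → Spec_apply_vowel_reduction phonemes stress_syllable_idx (apply_vowel_reduction phonemes stress_syllable_idx)

-- ===== LEMMAS AND PROOFS =====

-- Proof intermediate: a single left-to-right scan, used as a bridge between A's in-place loop
-- and B's chunk decomposition.
def pvScan (stress : Int) : List String → Int → List String
  | [], _ => []
  | ph :: rest, k =>
    match pvBaseB ph with
    | none => ph :: pvScan stress rest k
    | some b => pvReduceB b ph k stress :: pvScan stress rest (k + 1)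

lemma base_eq (ph : String) : pvSoundA ph = pvBaseB ph := rfl

lemma base_mem (ph b : String) (hv : pvBaseB ph = some b) :
    b ∈ (["a", "o", "u", "ɨ", "e", "i"] : List String) := by
  unfold pvBaseB at hv
  by_cases h6 : ph ∈ (["a", "o", "u", "ɨ", "e", "i"] : List String)
  · rw [if_pos h6] at hv; cases hv; exact h6
  · rw [if_neg h6] at hv
    by_cases h4 : ph ∈ (["ja", "jo", "ju", "je"] : List String)
    · rw [if_pos h4] at hv
      cases hv
      simp only [List.mem_cons, List.not_mem_nil, or_false] at h4
      rcases h4 with rfl | rfl | rfl | rfl <;> decide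
    · rw [if_neg h4] at hv; cases hv

-- A's per-vowel if-tree on a prefix++vowel::rest list equals a pvReduceB cons.
lemma tree_list (b ph : String) (hb : b ∈ (["a", "o", "u", "ɨ", "e", "i"] : List String))
    (c stress : Int) (pref rest : List String) :
    (if c ≠ stress then
      if c < stress then
        if stress - c = 1 then
          if (some b : Option String) = some "o" ∨ (some b : Option String) = some "a" then
            (pref ++ ph :: rest).set pref.length "ɐ"
          else
            if (some b : Option String) = some "e" ∨ (some b : Option String) = some "je" ∨
               (some b : Option String) = some "jo" ∨ (some b : Option String) = some "i" then
              (pref ++ ph :: rest).set pref.length "ɪ"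
            else pref ++ ph :: rest
        else
          if (some b : Option String) = some "o" ∨ (some b : Option String) = some "a" ∨
             (some b : Option String) = some "e" ∨ (some b : Option String) = some "ja" ∨
             (some b : Option String) = some "jo" ∨ (some b : Option String) = some "je" ∨
             (some b : Option String) = some "i" then
            (pref ++ ph :: rest).set pref.length "ə"
          else pref ++ ph :: rest
      else
        if (some b : Option String) = some "o" ∨ (some b : Option String) = some "a" ∨
           (some b : Option String) = some "e" ∨ (some b : Option String) = some "ja" ∨
           (some b : Option String) = some "jo" ∨ (some b : Option String) = some "je" ∨
           (some b : Option String) = some "i" then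
          (pref ++ ph :: rest).set pref.length "ə"
        else pref ++ ph :: rest
    else pref ++ ph :: rest)
    = pref ++ pvReduceB b ph c stress :: rest := by
  have hset : ∀ x : String, (pref ++ ph :: rest).set pref.length x = pref ++ x :: rest := by
    intro x; simp
  unfold pvReduceB
  by_cases hcs : c = stress
  · simp [hcs]
  · by_cases h1 : stress - c = 1
    · have hlt : c < stress := by omega
      simp only [hcs, h1, hlt, ne_eq, not_false_eq_true, if_true, if_false, hset]
      simp only [List.mem_cons, List.not_mem_nil, or_false] at hb
      rcases hb with rfl | rfl | rfl | rfl | rfl | rfl <;> simp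
    · by_cases hlt : c < stress <;>
        · simp only [hcs, h1, hlt, ne_eq, not_false_eq_true, if_true, if_false, hset]
          simp only [List.mem_cons, List.not_mem_nil, or_false] at hb
          rcases hb with rfl | rfl | rfl | rfl | rfl | rfl <;> simp

-- A's loop equals the scan.
theorem avr_loop_eq (stress : Int) (l : List String) : ∀ (pref0 pref : List String) (c : Int),
    pref0.length = pref.length →
    avrLoopA ((pref0 ++ l).map pvSoundA) stress (PySem.List.enumerate l (pref.length : Int))
      (pref ++ l) c pref.length = pref ++ pvScan stress l c := by
  induction l with
  | nil => intro pref0 pref c h; simp [avrLoopA, pvScan]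
  | cons ph rest ih =>
    intro pref0 pref c hlen0
    rw [PySem.List.enumerate_cons]
    have hget : ((pref0 ++ ph :: rest).map pvSoundA).getD pref.length none = pvSoundA ph := by
      rw [← hlen0]; simp [List.getD]
    have hlen : pref.length < ((pref0 ++ ph :: rest).map pvSoundA).length := by
      simp; omega
    rw [avrLoopA]
    simp only [hget, if_pos hlen, Int.toNat_natCast, pvScan, base_eq]
    cases hv : pvBaseB ph with
    | none =>
      simp only [Option.isSome_none, Bool.false_eq_true, if_false]
      have := ih (pref0 ++ [ph]) (pref ++ [ph]) c (by simp [hlen0])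
      simp only [List.append_assoc, List.cons_append, List.nil_append, List.length_append,
        List.length_cons, List.length_nil, Nat.cast_add, Nat.cast_one] at this
      simpa using this
    | some b =>
      simp only [Option.isSome_some, if_true]
      rw [tree_list b ph (base_mem ph b hv) c stress pref rest]
      have := ih (pref0 ++ [ph]) (pref ++ [pvReduceB b ph c stress]) (c + 1) (by simp [hlen0])
      simp only [List.append_assoc, List.cons_append, List.nil_append, List.length_append,
        List.length_cons, List.length_nil, Nat.cast_add, Nat.cast_one] at this
      simpa using this

-- B's chunk decomposition equals the scan.
lemma chunks_emit_eq (stress : Int) (l : List String) : ∀ (cur : List String) (k : Int),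
    pvEmitB stress (pvChunksB l cur).1 k ++ (pvChunksB l cur).2 = cur ++ pvScan stress l k := by
  induction l with
  | nil => intro cur k; simp [pvChunksB, pvEmitB, pvScan]
  | cons ph rest ih =>
    intro cur k
    cases hv : pvBaseB ph with
    | none =>
      simp only [pvChunksB, hv, pvScan]
      rw [ih (cur ++ [ph]) k]; simp
    | some b =>
      simp only [pvChunksB, hv, pvScan, pvEmitB, List.cons_append, List.append_assoc]
      rw [ih [] (k + 1)]; simp

-- ===== VERDICT (by name: the statement is the Claim_ definition above) =====
theorem apply_vowel_reduction_spec : Claim_equal_apply_vowel_reduction := by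
  intro phonemes stress _
  unfold Spec_apply_vowel_reduction apply_vowel_reduction apply_vowel_reduction_alt
  by_cases h : phonemes = []
  · simp [h]
  · rw [if_neg h, if_neg h]
    have hA := avr_loop_eq stress phonemes [] [] 0 rfl
    simpa [chunks_emit_eq stress phonemes [] 0] using hA
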